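-- pv_equiv track=rewrite | github.com/gabrielntwari/rwanda-jobs-scraper | scrapers/jobskazi_scraper.py | infer_field
-- ===== SOURCE A (Python) =====
-- from typing import List, Dict, Optional, Any
--
-- def infer_field(text: str, keyword_map: Dict[str, List[str]],
--                 title: str = "") -> Optional[str]:
--     """
--     Return the best matching category.
--     1. Match against title first (stronger signal).
--     2. Fall back to full text. Longer phrases preferred.
--     """
--     def best_match(haystack: str) -> Optional[str]:
--         h = haystack.lower()
--         best_cat, best_len = None, 0
--         for category, keywords in keyword_map.items():
--             for kw in sorted(keywords, key=len, reverse=True):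
--                 if kw in h and len(kw) > best_len:
--                     best_cat, best_len = category, len(kw)
--                     break
--         return best_cat
--
--     if title:
--         result = best_match(title)
--         if result:
--             return result
--     return best_match(text) if text else None
-- ===== SOURCE B (Python) =====
-- def infer_field(text, keyword_map, title=""):
--     """Same result as A: flatten all (category, keyword) candidates that occur in
--     the lowered haystack and take the single max by keyword length (max keeps the
--     first maximal element, i.e. the earliest category) — no per-category sorting,
--     no mutable best-so-far bookkeeping."""
--     def best_match(haystack):
--         h = haystack.lower()
--         cands = [(cat, kw)
--                  for cat, kws in keyword_map.items()
--                  for kw in kws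
--                  if kw and kw in h]
--         top = max(cands, key=lambda p: len(p[1]), default=None)
--         return top[0] if top else None
--
--     if title:
--         result = best_match(title)
--         if result:
--             return result
--     return best_match(text) if text else None
-- ===== Notes on version B (the rewrite author's own statement) =====
-- stated objective: simpler
-- what changed: A's per-category length-descending sort with an early-break mutable best-so-far scan is replaced by one flat list of matching (category, keyword) candidates and a single max-by-keyword-length (max keeps the first maximal element, i.e. the earliest category), eliminating the sorting and the best_len bookkeeping.
import Mathlib
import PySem

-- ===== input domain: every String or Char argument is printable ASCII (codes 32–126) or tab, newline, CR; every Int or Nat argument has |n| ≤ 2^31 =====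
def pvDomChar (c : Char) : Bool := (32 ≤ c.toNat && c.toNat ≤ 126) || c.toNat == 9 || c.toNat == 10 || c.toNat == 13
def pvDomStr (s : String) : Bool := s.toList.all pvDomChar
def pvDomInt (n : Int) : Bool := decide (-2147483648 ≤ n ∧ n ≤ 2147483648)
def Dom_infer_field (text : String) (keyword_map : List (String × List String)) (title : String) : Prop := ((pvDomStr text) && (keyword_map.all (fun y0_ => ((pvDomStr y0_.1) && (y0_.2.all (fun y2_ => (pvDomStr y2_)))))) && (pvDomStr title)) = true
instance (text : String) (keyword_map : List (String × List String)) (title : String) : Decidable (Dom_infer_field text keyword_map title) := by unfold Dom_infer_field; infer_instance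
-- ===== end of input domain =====

-- B replaces A's per-category sort + break + mutable best-so-far with one flat
-- candidate list and a single max-by-length; objective: simpler, same result.

-- ===== PORT A =====
-- inner 'for kw in sorted(keywords, key=len, reverse=True): if kw in h and len(kw) > best_len: …; break'
def pvInnerA (h cat : String) (bc : Option String) (bl : Int) : List String → Option String × Int
  | [] => (bc, bl)
  | kw :: rest =>
      if PySem.Str.isIn kw h && decide (bl < PySem.Str.len kw) then (some cat, PySem.Str.len kw)
      else pvInnerA h cat bc bl rest

-- A's best_match: loop over keyword_map.items() updating (best_cat, best_len)
def pvBestA (keyword_map : List (String × List String)) (haystack : String) : Option String :=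
  let h := PySem.Str.lower haystack
  (keyword_map.foldl
    (fun st c => pvInnerA h c.1 st.1 st.2 (PySem.List.sorted c.2 PySem.Str.len true))
    ((none : Option String), (0 : Int))).1

-- 'return best_match(text) if text else None'
def pvTailA (text : String) (keyword_map : List (String × List String)) : Option String :=
  if text ≠ "" then pvBestA keyword_map text else none

def infer_field (text : String) (keyword_map : List (String × List String)) (title : String) : Option String :=
  if title ≠ "" then
    match pvBestA keyword_map title with
    | some r => if r ≠ "" then some r else pvTailA text keyword_map   -- 'if result:' — falsy for None and ""
    | none => pvTailA text keyword_map
  else pvTailA text keyword_map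

-- ===== PORT B =====
-- B's best_match: flat candidate list, then max(…, key=len of kw) (first maximal)
def pvCandsB (keyword_map : List (String × List String)) (h : String) : List (String × String) :=
  keyword_map.flatMap
    (fun c => (c.2.filter (fun kw => decide (kw ≠ "") && PySem.Str.isIn kw h)).map (fun kw => (c.1, kw)))

def pvBestB (keyword_map : List (String × List String)) (haystack : String) : Option String :=
  let h := PySem.Str.lower haystack
  match PySem.List.max? (pvCandsB keyword_map h) (fun p => PySem.Str.len p.2) with
  | some top => some top.1
  | none => none

def pvTailB (text : String) (keyword_map : List (String × List String)) : Option String :=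
  if text ≠ "" then pvBestB keyword_map text else none

def infer_field_alt (text : String) (keyword_map : List (String × List String)) (title : String) : Option String :=
  if title ≠ "" then
    match pvBestB keyword_map title with
    | some r => if r ≠ "" then some r else pvTailB text keyword_map
    | none => pvTailB text keyword_map
  else pvTailB text keyword_map

-- ===== PRECONDITION & SPEC =====
def Spec_infer_field (text : String) (keyword_map : List (String × List String)) (title : String) (out : Option String) : Prop := out = infer_field_alt text keyword_map title
instance (text : String) (keyword_map : List (String × List String)) (title : String) (out : Option String) : Decidable (Spec_infer_field text keyword_map title out) := by unfold Spec_infer_field; infer_instance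

-- ===== CLAIM (what is proved, stated in full; the proofs are below) =====
def Claim_equal_infer_field : Prop := ∀ (text : String) (keyword_map : List (String × List String)) (title : String), Dom_infer_field text keyword_map title → Spec_infer_field text keyword_map title (infer_field text keyword_map title)

-- ===== LEMMAS AND PROOFS =====

-- spec step: strict update of (best_cat, best_len) on one candidate pair
def pvGstep (st : Option String × Int) (p : String × String) : Option String × Int :=
  if st.2 < PySem.Str.len p.2 then (some p.1, PySem.Str.len p.2) else st

lemma pvGstep_pos (st : Option String × Int) (p : String × String)
    (h : st.2 < PySem.Str.len p.2) : pvGstep st p = (some p.1, PySem.Str.len p.2) := if_pos h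

lemma pvGstep_neg (st : Option String × Int) (p : String × String)
    (h : ¬ st.2 < PySem.Str.len p.2) : pvGstep st p = st := if_neg h

-- running max of keyword lengths
def pvMaxL (ps : List String) : Int := ps.foldl (fun m kw => max m (PySem.Str.len kw)) 0

-- the filter predicate of B's comprehension
def pvPred (h : String) (kw : String) : Bool := decide (kw ≠ "") && PySem.Str.isIn kw h

lemma pv_len_nonneg (s : String) : 0 ≤ PySem.Str.len s := by
  simp [PySem.Str.len]

lemma pv_ne_empty_iff (s : String) : s ≠ "" ↔ s.toList ≠ [] := by
  constructor
  · intro h hc; exact h (String.ext (by simpa using hc))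
  · intro h hc; exact h (by simp [hc])

lemma pv_len_pos_iff (s : String) : 0 < PySem.Str.len s ↔ s ≠ "" := by
  rw [pv_ne_empty_iff, show PySem.Str.len s = (s.toList.length : Int) from rfl,
    Int.natCast_pos, List.length_pos_iff]

lemma pv_maxL_nonneg (ps : List String) : 0 ≤ pvMaxL ps :=
  (PySem.List.le_foldl_max_int ps PySem.Str.len 0).1

lemma pv_maxL_le (ps : List String) (c : Int) (hc : 0 ≤ c)
    (h : ∀ kw ∈ ps, PySem.Str.len kw ≤ c) : pvMaxL ps ≤ c := by
  suffices H : ∀ a : Int, a ≤ c → ps.foldl (fun m kw => max m (PySem.Str.len kw)) a ≤ c by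
    exact H 0 hc
  induction ps with
  | nil => intro a ha; simpa using ha
  | cons k t ih =>
      intro a ha
      simp only [List.foldl_cons]
      exact ih (fun kw hkw => h kw (List.mem_cons_of_mem _ hkw))
        _ (by have := h k (List.mem_cons_self); omega)

lemma pv_maxL_init (t : List String) (a : Int) (ha : 0 ≤ a) :
    t.foldl (fun m kw => max m (PySem.Str.len kw)) a = max a (pvMaxL t) := by
  induction t generalizing a with
  | nil => simp [pvMaxL]; omega
  | cons k s ih =>
      have hk := pv_len_nonneg k
      have h1 := ih (max a (PySem.Str.len k)) (by omega)
      have h2 := ih (max 0 (PySem.Str.len k)) (by omega)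
      have hs := pv_maxL_nonneg s
      simp only [pvMaxL, List.foldl_cons] at *
      rw [h1, h2]
      omega

lemma pv_maxL_cons (k : String) (t : List String) :
    pvMaxL (k :: t) = max (PySem.Str.len k) (pvMaxL t) := by
  have hk := pv_len_nonneg k
  have h := pv_maxL_init t (max 0 (PySem.Str.len k)) (by omega)
  have ht := pv_maxL_nonneg t
  simp only [pvMaxL, List.foldl_cons] at *
  rw [h]; omega

lemma pv_maxL_perm {l1 l2 : List String} (h : l1.Perm l2) : pvMaxL l1 = pvMaxL l2 := by
  have : RightCommutative fun (m : Int) kw => max m (PySem.Str.len kw) :=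
    ⟨fun b a1 a2 => by simp [max_comm, max_assoc, max_left_comm]⟩
  exact h.foldl_eq 0

-- A's inner sorted-descending loop computes the strict max-update with the
-- category's maximal contained keyword length
lemma pv_innerA_eq (h cat : String) :
    ∀ (L : List String), L.Pairwise (fun a b => PySem.Str.len b ≤ PySem.Str.len a) →
    ∀ (bc : Option String) (bl : Int), 0 ≤ bl →
    pvInnerA h cat bc bl L =
      (if bl < pvMaxL (L.filter (pvPred h)) then (some cat, pvMaxL (L.filter (pvPred h))) else (bc, bl)) := by
  intro L
  induction L with
  | nil => intro _ bc bl hbl; simp [pvInnerA, pvMaxL, hbl.not_gt]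
  | cons k t ih =>
      intro hpw bc bl hbl
      have hpt := (List.pairwise_cons.mp hpw).2
      have hhd := (List.pairwise_cons.mp hpw).1
      have hmt_le : pvMaxL (t.filter (pvPred h)) ≤ max 0 (PySem.Str.len k) := by
        refine pv_maxL_le _ _ (by have := pv_len_nonneg k; omega) ?_
        intro kw hkw
        have := hhd kw (List.mem_of_mem_filter hkw)
        omega
      have hmt0 := pv_maxL_nonneg (t.filter (pvPred h))
      by_cases hin : PySem.Str.isIn k h = true
      · by_cases hgt : bl < PySem.Str.len k
        · -- match and strictly longer: update and break
          have hk0 : 0 < PySem.Str.len k := by omega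
          have hpk : pvPred h k = true := by
            simp only [pvPred, hin, Bool.and_true]
            simpa using (pv_len_pos_iff k).mp hk0
          have hcond : (PySem.Str.isIn k h && decide (bl < PySem.Str.len k)) = true := by
            rw [hin]; simpa using hgt
          have hstep : pvInnerA h cat bc bl (k :: t) = (some cat, PySem.Str.len k) := by
            simp only [pvInnerA, hcond]; simp
          rw [hstep, List.filter_cons_of_pos hpk, pv_maxL_cons]
          have hmax : max (PySem.Str.len k) (pvMaxL (t.filter (pvPred h))) = PySem.Str.len k := by
            omega
          rw [hmax, if_pos hgt]
        · -- match but not longer: scan on (no later keyword can be longer)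
          have hcond : (PySem.Str.isIn k h && decide (bl < PySem.Str.len k)) = false := by
            rw [hin]; simpa using hgt
          have hstep : pvInnerA h cat bc bl (k :: t) = pvInnerA h cat bc bl t := by
            simp only [pvInnerA, hcond]; simp
          rw [hstep, ih hpt bc bl hbl]
          by_cases hk0 : 0 < PySem.Str.len k
          · have hpk : pvPred h k = true := by
              simp only [pvPred, hin, Bool.and_true]
              simpa using (pv_len_pos_iff k).mp hk0
            rw [List.filter_cons_of_pos hpk, pv_maxL_cons]
            by_cases hmt : bl < pvMaxL (t.filter (pvPred h))
            · rw [show max (PySem.Str.len k) (pvMaxL (t.filter (pvPred h)))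
                  = pvMaxL (t.filter (pvPred h)) by omega]
            · rw [if_neg (by omega :
                  ¬ bl < max (PySem.Str.len k) (pvMaxL (t.filter (pvPred h)))), if_neg hmt]
          · have hke : k = "" := by
              have := pv_len_nonneg k
              by_contra hne
              exact hk0 ((pv_len_pos_iff k).mpr hne)
            have hpk : ¬ pvPred h k = true := by simp [pvPred, hke]
            rw [List.filter_cons_of_neg hpk]
      · -- no match: skip keyword
        have hcond : (PySem.Str.isIn k h && decide (bl < PySem.Str.len k)) = false := by
          simp only [Bool.and_eq_false_iff]
          left; simpa using hin
        have hstep : pvInnerA h cat bc bl (k :: t) = pvInnerA h cat bc bl t := by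
          simp only [pvInnerA, hcond]; simp
        have hinC : PySem.Chars.isIn k.toList h.toList = false := by
          have : PySem.Str.isIn k h = false := by simpa using hin
          exact this
        have hpk : ¬ pvPred h k = true := by simp [pvPred, hinC]
        rw [hstep, ih hpt bc bl hbl, List.filter_cons_of_neg hpk]

-- the strict-update fold over one category's candidate pairs is that same max-update
lemma pv_catfold_eq (cat : String) :
    ∀ (ps : List String) (bc : Option String) (bl : Int), 0 ≤ bl →
    (ps.map (fun kw => (cat, kw))).foldl pvGstep (bc, bl) =
      (if bl < pvMaxL ps then (some cat, pvMaxL ps) else (bc, bl)) := by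
  intro ps
  induction ps with
  | nil => intro bc bl hbl; simp [pvMaxL, hbl.not_gt]
  | cons k t ih =>
      intro bc bl hbl
      rw [pv_maxL_cons]
      have hk := pv_len_nonneg k
      have hmt := pv_maxL_nonneg t
      simp only [List.map_cons, List.foldl_cons]
      by_cases hgt : bl < PySem.Str.len k
      · have h1 : pvGstep (bc, bl) (cat, k) = (some cat, PySem.Str.len k) :=
          pvGstep_pos (bc, bl) (cat, k) hgt
        rw [h1, ih (some cat) (PySem.Str.len k) hk]
        by_cases hmk : PySem.Str.len k < pvMaxL t
        · rw [if_pos hmk, if_pos (by omega : bl < max (PySem.Str.len k) (pvMaxL t)),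
            show max (PySem.Str.len k) (pvMaxL t) = pvMaxL t by omega]
        · rw [if_neg hmk, if_pos (by omega : bl < max (PySem.Str.len k) (pvMaxL t)),
            show max (PySem.Str.len k) (pvMaxL t) = PySem.Str.len k by omega]
      · have h1 : pvGstep (bc, bl) (cat, k) = (bc, bl) :=
          pvGstep_neg (bc, bl) (cat, k) hgt
        rw [h1, ih bc bl hbl]
        by_cases hmt2 : bl < pvMaxL t
        · rw [if_pos hmt2, if_pos (by omega : bl < max (PySem.Str.len k) (pvMaxL t)),
            show max (PySem.Str.len k) (pvMaxL t) = pvMaxL t by omega]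
        · rw [if_neg hmt2, if_neg (by omega : ¬ bl < max (PySem.Str.len k) (pvMaxL t))]

-- A's whole category loop = the strict-update fold over B's flat candidate list
lemma pv_A_fold_eq (h : String) :
    ∀ (km : List (String × List String)) (st : Option String × Int), 0 ≤ st.2 →
    km.foldl (fun st c => pvInnerA h c.1 st.1 st.2 (PySem.List.sorted c.2 PySem.Str.len true)) st =
      (pvCandsB km h).foldl pvGstep st := by
  intro km
  induction km with
  | nil => intro st _; simp [pvCandsB]
  | cons c t ih =>
      intro st hst
      have hpw := PySem.List.sorted_pairwise_rev c.2 PySem.Str.len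
      have hperm := PySem.List.sorted_perm c.2 PySem.Str.len true
      have hM : pvMaxL ((PySem.List.sorted c.2 PySem.Str.len true).filter (pvPred h))
          = pvMaxL (c.2.filter (pvPred h)) :=
        pv_maxL_perm (hperm.filter _)
      have hinner : pvInnerA h c.1 st.1 st.2 (PySem.List.sorted c.2 PySem.Str.len true)
          = ((c.2.filter (pvPred h)).map (fun kw => (c.1, kw))).foldl pvGstep (st.1, st.2) := by
        rw [pv_innerA_eq h c.1 _ hpw st.1 st.2 hst, hM]
        exact (pv_catfold_eq c.1 _ st.1 st.2 hst).symm
      have hnext : 0 ≤ (((c.2.filter (pvPred h)).map (fun kw => (c.1, kw))).foldl pvGstep (st.1, st.2)).2 := by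
        rw [pv_catfold_eq c.1 _ st.1 st.2 hst]
        have := pv_maxL_nonneg (c.2.filter (pvPred h))
        split_ifs <;> simp <;> omega
      have hrhs : pvCandsB (c :: t) h
          = ((c.2.filter (pvPred h)).map (fun kw => (c.1, kw))) ++ pvCandsB t h := rfl
      rw [List.foldl_cons, hrhs, List.foldl_append, hinner, Prod.mk.eta]
      rw [Prod.mk.eta] at hnext
      exact ih _ hnext

-- max?'s internal first-maximal fold step, specialised to the length key
def pvMstep (acc : Option (String × String)) (x : String × String) : Option (String × String) :=
  match acc with
  | none => some x
  | some m => if PySem.Str.len m.2 < PySem.Str.len x.2 then some x else some m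

lemma pv_max?_eq (C : List (String × String)) :
    PySem.List.max? C (fun p => PySem.Str.len p.2) = C.foldl pvMstep none := by
  unfold PySem.List.max?
  exact PySem.List.foldl_congr_mem C _ _ none (fun acc x _ => by cases acc <;> rfl)

-- couple the strict-update fold with max?'s first-maximal fold
def pvRel : Option (String × String) → Option String × Int
  | none => (none, 0)
  | some m => (some m.1, PySem.Str.len m.2)

lemma pv_couple (C : List (String × String)) (hC : ∀ p ∈ C, 0 < PySem.Str.len p.2) :
    ∀ st : Option (String × String),
    C.foldl pvGstep (pvRel st) = pvRel (C.foldl pvMstep st) := by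
  induction C with
  | nil => intro st; simp
  | cons p t ih =>
      intro st
      have hp := hC p List.mem_cons_self
      have ht : ∀ q ∈ t, 0 < PySem.Str.len q.2 := fun q hq => hC q (List.mem_cons_of_mem _ hq)
      rw [List.foldl_cons, List.foldl_cons]
      cases st with
      | none =>
          rw [pvGstep_pos (pvRel none) p hp,
            show pvMstep none p = some p from rfl]
          exact ih ht (some p)
      | some m =>
          rw [show pvMstep (some m) p
              = (if PySem.Str.len m.2 < PySem.Str.len p.2 then some p else some m) from rfl]
          by_cases hlt : PySem.Str.len m.2 < PySem.Str.len p.2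
          · rw [pvGstep_pos (pvRel (some m)) p hlt, if_pos hlt]
            exact ih ht (some p)
          · rw [pvGstep_neg (pvRel (some m)) p hlt, if_neg hlt]
            exact ih ht (some m)

lemma pv_cands_pos (km : List (String × List String)) (h : String) :
    ∀ p ∈ pvCandsB km h, 0 < PySem.Str.len p.2 := by
  intro p hp
  simp only [pvCandsB, List.mem_flatMap, List.mem_map] at hp
  obtain ⟨c, _, kw, hkw, rfl⟩ := hp
  have := List.of_mem_filter hkw
  simp only [Bool.and_eq_true, decide_eq_true_eq] at this
  exact (pv_len_pos_iff kw).mpr this.1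

lemma pv_best_eq (km : List (String × List String)) (s : String) :
    pvBestA km s = pvBestB km s := by
  show (km.foldl
      (fun st c => pvInnerA (PySem.Str.lower s) c.1 st.1 st.2 (PySem.List.sorted c.2 PySem.Str.len true))
      ((none : Option String), (0 : Int))).1
    = match PySem.List.max? (pvCandsB km (PySem.Str.lower s)) (fun p => PySem.Str.len p.2) with
      | some top => some top.1
      | none => none
  rw [pv_A_fold_eq (PySem.Str.lower s) km ((none : Option String), (0 : Int)) le_rfl,
    show ((none : Option String), (0 : Int)) = pvRel none from rfl,
    pv_couple (pvCandsB km (PySem.Str.lower s)) (pv_cands_pos km (PySem.Str.lower s)) none,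
    pv_max?_eq (pvCandsB km (PySem.Str.lower s))]
  cases (pvCandsB km (PySem.Str.lower s)).foldl pvMstep none with
  | none => rfl
  | some m => rfl

lemma pv_tail_eq (text : String) (km : List (String × List String)) :
    pvTailA text km = pvTailB text km := by
  unfold pvTailA pvTailB
  rw [pv_best_eq]

-- ===== VERDICT (by name: the statement is the Claim_ definition above) =====
theorem infer_field_spec : Claim_equal_infer_field := by
  intro text km title _
  unfold Spec_infer_field infer_field infer_field_alt
  rw [pv_best_eq, pv_tail_eq]
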